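-- pv_equiv track=rewrite | github.com/MatAff/aoc_2021 | day_08.py | create_combos
-- ===== SOURCE A (Python) =====
-- def create_combos(items, so_far):
--     new_combos = []
--     for pos, i in enumerate(items):
--         extra = [*so_far, i]
--         new_combos.append(extra)
--         remaining = items[(pos + 1):]
--         if len(remaining) > 0:
--             new_combos.extend(create_combos(remaining, extra))
--     return new_combos
-- ===== SOURCE B (Python) =====
-- def create_combos(items, so_far):
--     # Explicit LIFO stack instead of recursion; same pre-order DFS output.
--     n = len(items)
--     result = []
--     stack = []
--     for pos in range(n - 1, -1, -1):
--         stack.append(([*so_far, items[pos]], pos + 1))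
--     while stack:
--         combo, start = stack.pop()
--         result.append(combo)
--         for pos in range(n - 1, start - 1, -1):
--             stack.append(([*combo, items[pos]], pos + 1))
--     return result
-- ===== Notes on version B (the rewrite author's own statement) =====
-- stated objective: alternative
-- what changed: Replaced A's recursion (recursive call per suffix) with an iterative explicit LIFO stack of (combo, next-index) frames that reproduces the same pre-order DFS over non-empty subsequences.
import Mathlib
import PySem

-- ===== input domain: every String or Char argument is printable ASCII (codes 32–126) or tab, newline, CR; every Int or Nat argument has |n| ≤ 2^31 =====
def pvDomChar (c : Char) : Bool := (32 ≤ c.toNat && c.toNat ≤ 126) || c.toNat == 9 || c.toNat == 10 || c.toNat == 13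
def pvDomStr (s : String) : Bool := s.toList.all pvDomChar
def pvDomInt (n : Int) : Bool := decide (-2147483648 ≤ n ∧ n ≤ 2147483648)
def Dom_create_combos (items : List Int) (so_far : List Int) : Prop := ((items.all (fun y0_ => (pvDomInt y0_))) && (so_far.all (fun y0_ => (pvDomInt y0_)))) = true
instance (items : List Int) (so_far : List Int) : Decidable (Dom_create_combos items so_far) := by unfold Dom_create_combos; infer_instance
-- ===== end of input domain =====

-- B replaces A's recursion with an explicit LIFO stack of (combo, start) frames (same pre-order DFS, same output); alternative decomposition, no speed claim.

-- ===== PORT A =====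
-- A's for-loop over enumerate(items): head iteration handled, the remaining iterations
-- (where remaining = items[(pos+1):] is `rest` and so_far is unchanged) are the recursion on `rest`.
def create_combos : List Int → List Int → List (List Int)
  | [], _ => []
  | i :: rest, so_far =>
    let extra := so_far ++ [i]
    extra :: ((if rest.length > 0 then create_combos rest extra else []) ++ create_combos rest so_far)

-- ===== PORT B =====
-- the push loop 'for pos in range(n-1, start-1, -1): stack.append((combo+[items[pos]], pos+1))';
-- stack top = list head; items[pos] is always in range in B, so pyGetD's default is never used
def ccPush (items : List Int) (n : Int) (combo : List Int) (lo : Int)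
    (st : List (List Int × Int)) : List (List Int × Int) :=
  (PySem.List.pyRange (n - 1) (lo - 1) (-1)).foldl
    (fun st pos => (combo ++ [PySem.List.pyGetD items pos 0], pos + 1) :: st) st

-- fuel bound for the while loop (a totality guard only: proved sufficient below)
def ccMeasure (n : Int) (st : List (List Int × Int)) : Nat :=
  (st.map (fun f => 2 ^ ((n + 1 - f.2).toNat))).sum

-- the while loop: pop a frame, emit its combo, push its children
def ccLoop (items : List Int) (n : Int) : Nat → List (List Int × Int) → List (List Int)
  | 0, _ => []
  | _, [] => []
  | fuel + 1, (combo, start) :: rest =>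
      combo :: ccLoop items n fuel (ccPush items n combo start rest)

def create_combos_alt (items : List Int) (so_far : List Int) : List (List Int) :=
  ccLoop items (items.length : Int)
    (ccMeasure (items.length : Int) (ccPush items (items.length : Int) so_far 0 []))
    (ccPush items (items.length : Int) so_far 0 [])

-- ===== PRECONDITION & SPEC =====
def Spec_create_combos (items : List Int) (so_far : List Int) (out : List (List Int)) : Prop := out = create_combos_alt items so_far
instance (items : List Int) (so_far : List Int) (out : List (List Int)) : Decidable (Spec_create_combos items so_far out) := by unfold Spec_create_combos; infer_instance

-- ===== CLAIM (what is proved, stated in full; the proofs are below) =====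
def Claim_equal_create_combos : Prop := ∀ (items : List Int) (so_far : List Int), Dom_create_combos items so_far → Spec_create_combos items so_far (create_combos items so_far)

-- ===== LEMMAS AND PROOFS =====

lemma pyRange_neg_one (a b : Int) :
    PySem.List.pyRange a b (-1) = (List.range (a - b).toNat).map (fun (k : Nat) => a - (k : Int)) := by
  simp only [PySem.List.pyRange]
  norm_num
  split_ifs with h
  · apply List.map_congr_left; intro k hk; ring
  · have e : (a - b).toNat = 0 := by omega
    simp [e]

lemma foldl_cons_rev {α β : Type} (g : α → β) (l : List α) (st : List β) :
    l.foldl (fun st x => g x :: st) st = (l.map g).reverse ++ st := by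
  induction l generalizing st with
  | nil => simp
  | cons x l ih => simp [ih]

lemma desc_reverse (n lo : Int) :
    ((List.range ((n - lo).toNat)).map (fun (k : Nat) => n - 1 - (k : Int))).reverse
      = (List.range ((n - lo).toNat)).map (fun (k : Nat) => lo + (k : Int)) := by
  apply List.ext_getElem
  · simp
  · intro i h1 h2
    simp only [List.length_reverse, List.length_map, List.length_range] at h1 h2
    rw [List.getElem_reverse]
    simp only [List.getElem_map, List.getElem_range, List.length_map, List.length_range]
    omega

lemma ccPush_eq (items : List Int) (n combo lo st) :
    ccPush items n combo lo st
      = ((List.range ((n - lo).toNat)).map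
          (fun (k : Nat) => (combo ++ [PySem.List.pyGetD items (lo + (k : Int)) 0], lo + (k : Int) + 1))) ++ st := by
  unfold ccPush
  rw [pyRange_neg_one]
  have e : (n - 1 - (lo - 1)) = n - lo := by ring
  rw [e, foldl_cons_rev, ← List.map_reverse, desc_reverse, List.map_map]
  rfl

lemma sum_pow_desc_lt (c : Nat) :
    ((List.range c).map (fun k => 2 ^ (c - k))).sum < 2 ^ (c + 1) := by
  induction c with
  | zero => simp
  | succ c ih =>
    rw [List.range_succ_eq_map]
    simp only [List.map_cons, List.map_map, List.sum_cons, Nat.sub_zero]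
    have e : ((List.range c).map ((fun k => 2 ^ (c + 1 - k)) ∘ Nat.succ))
        = (List.range c).map (fun k => 2 ^ (c - k)) := by
      apply List.map_congr_left; intro k hk
      simp only [Function.comp, Nat.succ_eq_add_one]
      congr 1
      omega
    rw [e]
    have h2 : 2 ^ (c + 1 + 1) = 2 ^ (c + 1) + 2 ^ (c + 1) := by ring
    omega

lemma ccMeasure_ccPush (items : List Int) (n combo lo st) :
    ccMeasure n (ccPush items n combo lo st) < 2 ^ ((n + 1 - lo).toNat) + ccMeasure n st := by
  rw [ccPush_eq]
  unfold ccMeasure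
  rw [List.map_append, List.sum_append, List.map_map]
  set c := (n - lo).toNat with hc
  have e : ((List.range c).map
      ((fun f : List Int × Int => 2 ^ ((n + 1 - f.2).toNat)) ∘
        fun (k : Nat) => (combo ++ [PySem.List.pyGetD items (lo + (k : Int)) 0], lo + (k : Int) + 1)))
      = (List.range c).map (fun k => 2 ^ (c - k)) := by
    apply List.map_congr_left; intro k hk
    simp only [List.mem_range] at hk
    simp only [Function.comp]
    congr 1
    omega
  rw [e]
  have h1 := sum_pow_desc_lt c
  by_cases hlo : lo ≤ n
  · have h2 : 2 ^ (c + 1) ≤ 2 ^ ((n + 1 - lo).toNat) := by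
      apply Nat.pow_le_pow_right (by norm_num); omega
    omega
  · have e0 : c = 0 := by omega
    simp [e0]

lemma A_cons (i : Int) (rest : List Int) (c : List Int) :
    create_combos (i :: rest) c
      = (c ++ [i]) :: (create_combos rest (c ++ [i]) ++ create_combos rest c) := by
  cases rest <;> simp [create_combos]

lemma A_unroll (items : List Int) (c : Nat) :
    ∀ (start : Int) (combo : List Int), 0 ≤ start → ((items.length : Int) - start).toNat = c →
      create_combos (items.drop start.toNat) combo
        = ((List.range c).map (fun (k : Nat) => start + (k : Int))).flatMap
            (fun pos => (combo ++ [PySem.List.pyGetD items pos 0])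
                :: create_combos (items.drop (pos + 1).toNat) (combo ++ [PySem.List.pyGetD items pos 0])) := by
  induction c with
  | zero =>
    intro start combo h0 hc
    have hge : items.length ≤ start.toNat := by omega
    rw [List.drop_of_length_le hge]
    simp [create_combos]
  | succ c ih =>
    intro start combo h0 hc
    have hlt : start.toNat < items.length := by omega
    rw [List.drop_eq_getElem_cons hlt, A_cons]
    have hg : PySem.List.pyGetD items start 0 = items[start.toNat] :=
      PySem.List.pyGetD_eq_getElem items 0 h0 (by omega)
    rw [List.range_succ_eq_map]
    simp only [List.map_cons, List.map_map, List.flatMap_cons, Nat.cast_zero, add_zero]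
    rw [hg]
    have e1 : (start + 1).toNat = start.toNat + 1 := by omega
    have e2 : ((List.range c).map ((fun (k : Nat) => start + (k : Int)) ∘ Nat.succ))
        = (List.range c).map (fun (k : Nat) => (start + 1) + (k : Int)) := by
      apply List.map_congr_left; intro k hk
      simp only [Function.comp, Nat.succ_eq_add_one]
      push_cast; ring
    rw [e2, ← ih (start + 1) combo (by omega) (by omega), e1]
    simp

-- what one stack frame contributes to B's output: its combo, then A's result for the remaining suffix
def ccExpand (items : List Int) (f : List Int × Int) : List (List Int) :=
  f.1 :: create_combos (items.drop f.2.toNat) f.1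

lemma ccPush_wf (items : List Int) (n combo lo st) (hlo : 0 ≤ lo)
    (hst : ∀ f ∈ st, 0 ≤ f.2) : ∀ f ∈ ccPush items n combo lo st, 0 ≤ f.2 := by
  rw [ccPush_eq]
  intro f hf
  rcases List.mem_append.1 hf with hf | hf
  · rcases List.mem_map.1 hf with ⟨k, hk, rfl⟩
    simp only
    omega
  · exact hst f hf

lemma ccLoop_eq (items : List Int) (fuel : Nat) :
    ∀ st, ccMeasure (items.length : Int) st ≤ fuel → (∀ f ∈ st, 0 ≤ f.2) →
      ccLoop items (items.length : Int) fuel st = st.flatMap (ccExpand items) := by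
  induction fuel with
  | zero =>
    intro st hm hw
    cases st with
    | nil => rfl
    | cons f rest =>
      exfalso
      have hp : 0 < 2 ^ (((items.length : Int) + 1 - f.2).toNat) := Nat.pow_pos (by norm_num)
      simp [ccMeasure] at hm
  | succ fuel ih =>
    intro st hm hw
    cases st with
    | nil => rfl
    | cons f rest =>
      obtain ⟨combo, start⟩ := f
      have h0 : (0 : Int) ≤ start := hw _ (List.mem_cons_self ..)
      have hmono := ccMeasure_ccPush items (items.length : Int) combo start rest
      have hmc : ccMeasure (items.length : Int) ((combo, start) :: rest)
          = 2 ^ (((items.length : Int) + 1 - start).toNat) + ccMeasure (items.length : Int) rest := by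
        simp [ccMeasure]
      show combo :: ccLoop items (items.length : Int) fuel (ccPush items (items.length : Int) combo start rest) = _
      rw [ih _ (by omega) (ccPush_wf items _ combo start rest h0 (fun f hf => hw f (List.mem_cons_of_mem _ hf)))]
      rw [ccPush_eq, List.flatMap_append, List.flatMap_cons]
      have hA := A_unroll items (((items.length : Int) - start).toNat) start combo h0 rfl
      simp only [ccExpand]
      rw [hA, List.flatMap_map, List.cons_append]
      simp only [ccExpand]
      rw [List.flatMap_map]

-- ===== VERDICT (by name: the statement is the Claim_ definition above) =====
theorem create_combos_spec : Claim_equal_create_combos := by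
  intro items so_far _
  unfold Spec_create_combos create_combos_alt
  rw [ccLoop_eq items _ _ (le_refl _) (ccPush_wf items _ so_far 0 [] (by norm_num) (by simp))]
  rw [ccPush_eq, List.append_nil]
  have hA := A_unroll items ((items.length : Int) - 0).toNat 0 so_far (by norm_num) rfl
  simp only [Int.toNat_zero, List.drop_zero, zero_add, sub_zero, Int.toNat_natCast] at hA ⊢
  rw [List.flatMap_map] at hA ⊢
  rw [hA]
  simp only [ccExpand]
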